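-- pv_equiv track=rewrite | github.com/abbasmoosajee07/AlgoVault | Codyssi/2025/08/CodyssiDay08.py | complete_reduction
-- ===== SOURCE A (Python) =====
-- def complete_reduction(base_string: str, consider_hyphen: bool = True) -> int:
--     hyphen_check = '-' if consider_hyphen else ''
--
--     def can_reduce_pair(c1, c2, hyphen):
--         return (c1.isdigit() and (c2.isalpha() or c2 == hyphen)) or \
--                 (c2.isdigit() and (c1.isalpha() or c1 == hyphen))
--
--     s = list(base_string)
--
--     while True:
--         reduced = False
--         i = 0
--         while i < len(s) - 1:
--             if can_reduce_pair(s[i], s[i+1], hyphen_check):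
--                 # Remove both s[i] and s[i+1]
--                 del s[i:i+2]
--                 reduced = True
--                 break  # Start over from beginning
--             i += 1
--         if not reduced:
--             break
--
--     return len(s)
-- ===== SOURCE B (Python) =====
-- def complete_reduction(base_string: str, consider_hyphen: bool = True) -> int:
--     # One stack pass: kind 1 (digit) and kind 2 (alpha, or hyphen when considered) annihilate.
--     def kind(ch):
--         if ch.isdigit():
--             return 1
--         if ch.isalpha() or (consider_hyphen and ch == '-'):
--             return 2
--         return 0
--     stack = []
--     for ch in base_string:
--         k = kind(ch)
--         if stack and stack[-1] + k == 3:
--             stack.pop()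
--         else:
--             stack.append(k)
--     return len(stack)
-- ===== Notes on version B (the rewrite author's own statement) =====
-- stated objective: faster
-- what changed: Replaced the restart-from-scratch repeated scan-and-delete loop with a single stack pass over character kinds (digit vs alpha/hyphen annihilate), which is correct because deleting any adjacent reducible pair leaves the stack result unchanged.
import Mathlib
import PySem

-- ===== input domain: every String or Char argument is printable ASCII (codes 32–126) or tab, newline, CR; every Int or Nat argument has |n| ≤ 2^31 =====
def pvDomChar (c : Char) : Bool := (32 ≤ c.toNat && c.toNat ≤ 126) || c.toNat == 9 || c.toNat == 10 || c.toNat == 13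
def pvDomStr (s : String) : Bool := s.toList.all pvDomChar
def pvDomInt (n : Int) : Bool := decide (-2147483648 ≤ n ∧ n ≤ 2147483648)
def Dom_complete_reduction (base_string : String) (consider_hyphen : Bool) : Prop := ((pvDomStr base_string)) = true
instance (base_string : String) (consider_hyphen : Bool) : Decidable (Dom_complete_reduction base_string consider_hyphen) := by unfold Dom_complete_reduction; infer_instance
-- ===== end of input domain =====

-- B changes the algorithm: A repeatedly rescans from the start and deletes the leftmost
-- reducible pair; B makes a single stack pass over character kinds.

-- ===== PORT A =====
-- hyphen_check is a Python string ('-' or ''), ported as its List Char ( ['-'] or [] );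
-- `c2 == hyphen` becomes `[c2] == hyphen` (exact: a 1-char string never equals '').
def canReducePair (c1 c2 : Char) (hyphen : List Char) : Bool :=
  (PySem.Chars.isdigit c1 && (PySem.Chars.isalpha c2 || [c2] == hyphen)) ||
  (PySem.Chars.isdigit c2 && (PySem.Chars.isalpha c1 || [c1] == hyphen))

-- the inner `while i < len(s) - 1` scan: delete the first reducible adjacent pair, or none
def scanReduce (s : List Char) (hyphen : List Char) : Option (List Char) :=
  match s with
  | c1 :: c2 :: rest =>
      if canReducePair c1 c2 hyphen then some rest
      else (scanReduce (c2 :: rest) hyphen).map (c1 :: ·)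
  | _ => none

theorem scanReduce_length (s hyphen : List Char) (s' : List Char)
    (h : scanReduce s hyphen = some s') : s'.length + 2 = s.length := by
  fun_induction scanReduce s hyphen generalizing s' with
  | case1 c1 c2 rest hc =>
      simp only [scanReduce, hc, if_pos, Option.some.injEq] at h
      subst h; simp
  | case2 c1 c2 rest hc ih =>
      simp only [scanReduce, hc, Bool.false_eq_true, if_neg, Option.map_eq_some_iff] at h
      obtain ⟨t, ht, rfl⟩ := h
      have := ih t ht
      simp only [List.length_cons] at this ⊢
      omega
  | case3 s h1 => cases s with
      | nil => simp [scanReduce] at h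
      | cons a t => cases t with
        | nil => simp [scanReduce] at h
        | cons b u => exact absurd rfl (h1 a b u)

-- the outer `while True` loop: restart from the beginning after each deletion
def reduceLoop (s : List Char) (hyphen : List Char) : List Char :=
  match h : scanReduce s hyphen with
  | some s' => reduceLoop s' hyphen
  | none => s
termination_by s.length
decreasing_by
  have := scanReduce_length s hyphen s' h
  omega

def complete_reduction (base_string : String) (consider_hyphen : Bool) : Int :=
  ((reduceLoop base_string.toList (if consider_hyphen then ['-'] else [])).length : Int)

-- ===== PORT B =====
def kindB (c : Char) (consider_hyphen : Bool) : Nat :=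
  if PySem.Chars.isdigit c then 1
  else if PySem.Chars.isalpha c || (consider_hyphen && c == '-') then 2
  else 0

def pushPop (st : List Nat) (k : Nat) : List Nat :=
  match st with
  | t :: r => if t + k == 3 then r else k :: t :: r
  | [] => [k]

def complete_reduction_alt (base_string : String) (consider_hyphen : Bool) : Int :=
  ((base_string.toList.foldl (fun st c => pushPop st (kindB c consider_hyphen)) []).length : Int)

-- ===== PRECONDITION & SPEC =====
def Spec_complete_reduction (base_string : String) (consider_hyphen : Bool) (out : Int) : Prop := out = complete_reduction_alt base_string consider_hyphen
instance (base_string : String) (consider_hyphen : Bool) (out : Int) : Decidable (Spec_complete_reduction base_string consider_hyphen out) := by unfold Spec_complete_reduction; infer_instance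

-- ===== CLAIM (what is proved, stated in full; the proofs are below) =====
def Claim_equal_complete_reduction : Prop := ∀ (base_string : String) (consider_hyphen : Bool), Dom_complete_reduction base_string consider_hyphen → Spec_complete_reduction base_string consider_hyphen (complete_reduction base_string consider_hyphen)

-- ===== LEMMAS AND PROOFS =====

-- run the stack over a kind list
def runK (st : List Nat) (ks : List Nat) : List Nat := ks.foldl pushPop st

-- invariant: no two adjacent stack entries annihilate
def InvK (st : List Nat) : Prop := List.IsChain (fun a b => a + b ≠ 3) st

theorem invK_pushPop (st : List Nat) (k : Nat) (h : InvK st) : InvK (pushPop st k) := by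
  cases st with
  | nil => simp [pushPop, InvK]
  | cons t r =>
      by_cases ht : t + k = 3
      · have h1 : (t + k == 3) = true := by simpa using ht
        simpa [pushPop, h1, InvK] using (List.IsChain.tail h)
      · have h1 : (t + k == 3) = false := by simpa using ht
        have he : pushPop (t :: r) k = k :: t :: r := by simp [pushPop, h1]
        rw [he]
        unfold InvK at h ⊢
        rw [List.isChain_cons_cons]
        exact ⟨by omega, h⟩

theorem invK_runK (ks : List Nat) (st : List Nat) (h : InvK st) : InvK (runK st ks) := by
  induction ks generalizing st with
  | nil => simpa [runK]
  | cons k ks ih => simpa [runK] using ih (pushPop st k) (invK_pushPop st k h)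

theorem annihilate (st : List Nat) (a b : Nat) (h : InvK st) (hab : a + b = 3) :
    pushPop (pushPop st a) b = st := by
  cases st with
  | nil =>
      have h2 : (a + b == 3) = true := by simpa using hab
      simp [pushPop, h2]
  | cons t r =>
      by_cases ht : t + a = 3
      · have hba : b = t := by omega
        have h1 : (t + a == 3) = true := by simpa using ht
        cases r with
        | nil => rw [hba]; simp [pushPop, h1]
        | cons t' r' =>
            have h2 : t + t' ≠ 3 := by
              unfold InvK at h; rw [List.isChain_cons_cons] at h; exact h.1
            have h3 : (t' + t == 3) = false := by simp; omega
            rw [hba]; simp [pushPop, h1, h3]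
      · have h1 : (t + a == 3) = false := by simpa using ht
        have h2 : (a + b == 3) = true := by simpa using hab
        simp [pushPop, h1, h2]

theorem runK_delete (u v : List Nat) (a b : Nat) (hab : a + b = 3) :
    runK [] (u ++ a :: b :: v) = runK [] (u ++ v) := by
  have hinv : InvK (runK [] u) := invK_runK u [] (by unfold InvK; exact List.IsChain.nil)
  simp only [runK, List.foldl_append, List.foldl_cons]
  rw [show (u.foldl pushPop []) = runK [] u from rfl,
    annihilate (runK [] u) a b hinv hab]

-- an irreducible kind list passes through the stack untouched (reversed)
theorem runK_irreducible (ks : List Nat) (h : List.IsChain (fun a b => a + b ≠ 3) ks) :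
    runK [] ks = ks.reverse := by
  induction ks using List.reverseRecOn with
  | nil => simp [runK]
  | append_singleton xs k ih =>
      rw [List.isChain_append] at h
      obtain ⟨hxs, -, hlast⟩ := h
      rw [runK, List.foldl_append, List.foldl_cons, List.foldl_nil,
        show (xs.foldl pushPop []) = runK [] xs from rfl, ih hxs]
      cases hx : xs.reverse with
      | nil => simp [pushPop, hx, List.reverse_append]
      | cons t r =>
          have hmem : xs.getLast? = some t := by
            rw [← List.head?_reverse, hx]; rfl
          have hne : t + k ≠ 3 := hlast t (by simp [hmem]) k (by simp)
          have h1 : (t + k == 3) = false := by simpa using hne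
          simp [pushPop, h1, hx, List.reverse_append]

-- characterisation of the inner scan: success = some adjacent reducible pair deleted
theorem scanReduce_some (s hyphen : List Char) (s' : List Char)
    (h : scanReduce s hyphen = some s') :
    ∃ u c1 c2 v, s = u ++ c1 :: c2 :: v ∧ s' = u ++ v ∧ canReducePair c1 c2 hyphen = true := by
  fun_induction scanReduce s hyphen generalizing s' with
  | case1 c1 c2 rest hc =>
      simp only [scanReduce, hc, if_pos, Option.some.injEq] at h
      exact ⟨[], c1, c2, rest, by simp, by simp [h], hc⟩
  | case2 c1 c2 rest hc ih =>
      simp only [scanReduce, hc, Bool.false_eq_true, if_neg, Option.map_eq_some_iff] at h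
      obtain ⟨t, ht, rfl⟩ := h
      obtain ⟨u, d1, d2, v, he, rfl, hcan⟩ := ih t ht
      exact ⟨c1 :: u, d1, d2, v, by simp [he], by simp, hcan⟩
  | case3 s h1 => cases s with
      | nil => simp [scanReduce] at h
      | cons a t => cases t with
        | nil => simp [scanReduce] at h
        | cons b u => exact absurd rfl (h1 a b u)

-- characterisation of the inner scan: failure = no adjacent reducible pair
theorem scanReduce_none (s hyphen : List Char)
    (h : scanReduce s hyphen = none) :
    List.IsChain (fun c1 c2 => canReducePair c1 c2 hyphen = false) s := by
  fun_induction scanReduce s hyphen with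
  | case1 c1 c2 rest hc => simp [scanReduce, hc] at h
  | case2 c1 c2 rest hc ih =>
      simp only [scanReduce, hc, Bool.false_eq_true, if_neg, Option.map_eq_none_iff] at h
      rw [List.isChain_cons_cons]
      exact ⟨by simpa using hc, ih h⟩
  | case3 s h1 => cases s with
      | nil => simp
      | cons a t => cases t with
        | nil => simp
        | cons b u => exact absurd rfl (h1 a b u)

-- kind facts: digits are disjoint from letters and from '-'
theorem isdigit_not_isalpha (c : Char) (h : PySem.Chars.isdigit c = true) :
    PySem.Chars.isalpha c = false := by
  simp only [PySem.Chars.isdigit, Bool.and_eq_true, decide_eq_true_eq] at h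
  obtain ⟨h1, h2⟩ := h
  rw [Char.le_def, UInt32.le_iff_toNat_le] at h1 h2
  have e0 : ('0').val.toNat = 48 := by decide
  have e9 : ('9').val.toNat = 57 := by decide
  rw [e0] at h1; rw [e9] at h2
  simp only [PySem.Chars.isalpha, PySem.Chars.isupper, PySem.Chars.islower,
    Bool.or_eq_false_iff, Bool.and_eq_false_iff]
  have eA : ('A').val.toNat = 65 := by decide
  have ea : ('a').val.toNat = 97 := by decide
  constructor
  · left
    simp only [decide_eq_false_iff_not, Char.le_def, UInt32.le_iff_toNat_le, eA]
    omega
  · left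
    simp only [decide_eq_false_iff_not, Char.le_def, UInt32.le_iff_toNat_le, ea]
    omega

theorem isdigit_not_dash (c : Char) (h : PySem.Chars.isdigit c = true) :
    (c == '-') = false := by
  simp only [PySem.Chars.isdigit, Bool.and_eq_true, decide_eq_true_eq] at h
  simp only [beq_eq_false_iff_ne, ne_eq]
  rintro rfl
  exact absurd h.1 (by decide)

theorem singleton_beq_hyphen (c : Char) (ch : Bool) :
    ([c] == (if ch then ['-'] else [])) = (ch && c == '-') := by
  cases ch <;> simp

-- A's pair test agrees with B's kind arithmetic
theorem can_eq_kind (c1 c2 : Char) (ch : Bool) :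
    canReducePair c1 c2 (if ch then ['-'] else []) =
      (kindB c1 ch + kindB c2 ch == 3) := by
  unfold canReducePair kindB
  rw [singleton_beq_hyphen, singleton_beq_hyphen]
  cases hd1 : PySem.Chars.isdigit c1 <;> cases hd2 : PySem.Chars.isdigit c2
  · cases h2 : (PySem.Chars.isalpha c1 || (ch && c1 == '-')) <;>
      cases h3 : (PySem.Chars.isalpha c2 || (ch && c2 == '-')) <;> simp
  · have ha := isdigit_not_isalpha c2 hd2
    have hh := isdigit_not_dash c2 hd2
    cases h2 : (PySem.Chars.isalpha c1 || (ch && c1 == '-')) <;>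
      simp [ha, hh, h2]
  · have ha := isdigit_not_isalpha c1 hd1
    have hh := isdigit_not_dash c1 hd1
    cases h3 : (PySem.Chars.isalpha c2 || (ch && c2 == '-')) <;>
      simp [ha, hh, h3]
  · have ha1 := isdigit_not_isalpha c1 hd1
    have hh1 := isdigit_not_dash c1 hd1
    have ha2 := isdigit_not_isalpha c2 hd2
    have hh2 := isdigit_not_dash c2 hd2
    simp [ha1, hh1, ha2, hh2]

-- the stack result is invariant under A's outer loop
theorem runK_reduceLoop (s : List Char) (ch : Bool) :
    runK [] ((reduceLoop s (if ch then ['-'] else [])).map (kindB · ch)) =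
      runK [] (s.map (kindB · ch)) := by
  fun_induction reduceLoop s (if ch then ['-'] else []) with
  | case1 s s' heq ih =>
      rw [ih]
      obtain ⟨u, c1, c2, v, rfl, rfl, hcan⟩ := scanReduce_some _ _ _ heq
      rw [can_eq_kind] at hcan
      have hab : kindB c1 ch + kindB c2 ch = 3 := by simpa using hcan
      simpa using (runK_delete (u.map (kindB · ch)) (v.map (kindB · ch)) _ _ hab).symm
  | case2 s h => rfl

-- the fixed point of A's loop is irreducible, so the stack returns it whole
theorem reduceLoop_irreducible (s : List Char) (ch : Bool) :
    List.IsChain (fun a b => a + b ≠ 3)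
      ((reduceLoop s (if ch then ['-'] else [])).map (kindB · ch)) := by
  fun_induction reduceLoop s (if ch then ['-'] else []) with
  | case1 s s' heq ih => exact ih
  | case2 s h =>
      have hc := scanReduce_none s _ h
      rw [List.isChain_map]
      refine hc.imp ?_
      intro a b hab
      rw [can_eq_kind] at hab
      simpa using hab

-- ===== VERDICT (by name: the statement is the Claim_ definition above) =====
theorem complete_reduction_spec : Claim_equal_complete_reduction := by
  intro base_string ch _
  unfold Spec_complete_reduction complete_reduction complete_reduction_alt
  set s := base_string.toList with hs
  have h1 := runK_reduceLoop s ch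
  have h2 := runK_irreducible _ (reduceLoop_irreducible s ch)
  have h3 : (s.foldl (fun st c => pushPop st (kindB c ch)) []) =
      runK [] (s.map (kindB · ch)) := by
    simp [runK, List.foldl_map]
  rw [h3, ← h1, h2]
  simp
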